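-- pv_equiv track=rewrite | github.com/hyperlexus/pizza-eval | src/pizza_eval/utils.py | remove_text_inside_gaensefuesschen
-- ===== SOURCE A (Python) =====
-- def remove_text_inside_gaensefuesschen(expression):  # for contains_a_check
--     out = ""
--     inside_gaensefuesschen = False
--     for char in expression:
--         if char == "'":
--             out += char
--             inside_gaensefuesschen = not inside_gaensefuesschen
--             continue
--         if not inside_gaensefuesschen:
--             out += char
--     return out
-- ===== SOURCE B (Python) =====
-- def remove_text_inside_gaensefuesschen(expression):
--     parts = expression.split("'")
--     return "'".join(part if i % 2 == 0 else "" for i, part in enumerate(parts))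
-- ===== Notes on version B (the rewrite author's own statement) =====
-- stated objective: faster
-- what changed: Replaces the per-character toggle loop with repeated string concatenation by a single split on the quote character, blanking odd-indexed segments and rejoining with quotes.
import Mathlib
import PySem

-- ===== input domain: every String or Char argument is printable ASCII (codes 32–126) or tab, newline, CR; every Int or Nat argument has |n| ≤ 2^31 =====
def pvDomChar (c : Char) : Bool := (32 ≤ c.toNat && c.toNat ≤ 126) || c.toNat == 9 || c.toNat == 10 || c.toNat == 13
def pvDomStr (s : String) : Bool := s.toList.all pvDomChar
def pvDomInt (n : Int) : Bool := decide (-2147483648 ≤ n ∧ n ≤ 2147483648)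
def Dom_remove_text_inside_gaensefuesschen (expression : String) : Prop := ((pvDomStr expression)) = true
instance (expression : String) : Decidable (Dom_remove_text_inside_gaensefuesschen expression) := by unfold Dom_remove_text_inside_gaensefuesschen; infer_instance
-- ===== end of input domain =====

-- B replaces A's per-character quote-toggle loop by one split on the quote, blanking
-- odd-indexed segments and rejoining with quotes (idiomatic; same observable behaviour).

-- ===== PORT A =====
-- literal transliteration of A: a fold carrying (out, inside_gaensefuesschen)
def remove_text_inside_gaensefuesschen (expression : String) : String :=
  String.ofList (expression.toList.foldl
    (fun (st : List Char × Bool) c =>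
      if c == '\'' then (st.1 ++ [c], !st.2)
      else if !st.2 then (st.1 ++ [c], st.2)
      else st)
    ([], false)).1

-- ===== PORT B =====
-- literal transliteration of B: split on "'", keep even-indexed parts, join with "'"
def remove_text_inside_gaensefuesschen_alt (expression : String) : String :=
  String.ofList (PySem.Chars.join ['\'']
    ((PySem.List.enumerate (PySem.Chars.splitOn expression.toList ['\'']) 0).map
      (fun p => if PySem.Int.mod p.1 2 == 0 then p.2 else [])))

-- ===== PRECONDITION & SPEC =====
def Spec_remove_text_inside_gaensefuesschen (expression : String) (out : String) : Prop := out = remove_text_inside_gaensefuesschen_alt expression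
instance (expression : String) (out : String) : Decidable (Spec_remove_text_inside_gaensefuesschen expression out) := by unfold Spec_remove_text_inside_gaensefuesschen; infer_instance

-- ===== CLAIM (what is proved, stated in full; the proofs are below) =====
def Claim_equal_remove_text_inside_gaensefuesschen : Prop := ∀ (expression : String), Dom_remove_text_inside_gaensefuesschen expression → Spec_remove_text_inside_gaensefuesschen expression (remove_text_inside_gaensefuesschen expression)

-- ===== LEMMAS AND PROOFS =====

-- reference function: what A computes, as a structural recursion
def pvF : List Char → Bool → List Char
  | [], _ => []
  | c :: r, b =>
    if c = '\'' then '\'' :: pvF r (!b)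
    else if b then pvF r b else c :: pvF r b

-- structural single-quote split
def pvSplit1 : List Char → List (List Char)
  | [] => [[]]
  | c :: r =>
    if c = '\'' then [] :: pvSplit1 r
    else
      match pvSplit1 r with
      | [] => [[c]]
      | p :: ps => (c :: p) :: ps

def pvConsHead (p : List Char) : List (List Char) → List (List Char)
  | [] => [p]
  | x :: xs => (p ++ x) :: xs

mutual
  def pvAltKeep : List (List Char) → List (List Char)
    | [] => []
    | x :: xs => x :: pvAltDrop xs
  def pvAltDrop : List (List Char) → List (List Char)
    | [] => []
    | _ :: xs => [] :: pvAltKeep xs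
end

theorem pvSplit1_ne_nil (cs : List Char) : pvSplit1 cs ≠ [] := by
  induction cs with
  | nil => simp [pvSplit1]
  | cons c r ih =>
    simp only [pvSplit1]
    split
    · simp
    · cases h : pvSplit1 r <;> simp

theorem pvConsHead_nil (l : List (List Char)) (h : l ≠ []) : pvConsHead [] l = l := by
  cases l with
  | nil => exact absurd rfl h
  | cons x xs => simp [pvConsHead]

theorem pv_go_spec (fuel : Nat) (cs cur : List Char) (acc : List (List Char))
    (h : cs.length < fuel) :
    PySem.Chars.splitOn.go ['\''] fuel cs cur acc
      = acc.reverse ++ pvConsHead cur.reverse (pvSplit1 cs) := by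
  induction fuel generalizing cs cur acc with
  | zero => omega
  | succ fuel ih =>
    cases cs with
    | nil => simp [PySem.Chars.splitOn.go, pvSplit1, pvConsHead]
    | cons c rest =>
      by_cases hc : c = '\''
      · subst hc
        have hp : List.isPrefixOf ['\''] ('\'' :: rest) = true := by
          simp [List.isPrefixOf]
        simp only [PySem.Chars.splitOn.go, hp, if_true]
        rw [show List.drop (['\''].length) ('\'' :: rest) = rest from by simp]
        rw [ih rest [] (cur.reverse :: acc)
          (by simpa using Nat.lt_of_succ_lt_succ h)]
        rw [show ([] : List Char).reverse = [] from rfl,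
          pvConsHead_nil _ (pvSplit1_ne_nil rest)]
        simp [pvSplit1, pvConsHead]
      · have hp : List.isPrefixOf ['\''] (c :: rest) = false := by
          simp [List.isPrefixOf]
          exact fun hh => hc hh.symm
        simp only [PySem.Chars.splitOn.go, hp, Bool.false_eq_true, if_false]
        rw [ih rest (c :: cur) acc (by simpa using Nat.lt_of_succ_lt_succ h)]
        simp only [pvSplit1, hc, if_false]
        cases h1 : pvSplit1 rest with
        | nil => exact absurd h1 (pvSplit1_ne_nil rest)
        | cons p ps => simp [pvConsHead]

theorem pvSplitOn_eq (cs : List Char) :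
    PySem.Chars.splitOn cs ['\''] = pvSplit1 cs := by
  unfold PySem.Chars.splitOn
  rw [pv_go_spec (cs.length + 1) cs [] [] (by omega)]
  simp [pvConsHead_nil _ (pvSplit1_ne_nil cs)]

-- A's fold computes pvF
theorem pvFoldA_spec (cs : List Char) (out : List Char) (b : Bool) :
    (cs.foldl
      (fun (st : List Char × Bool) c =>
        if c == '\'' then (st.1 ++ [c], !st.2)
        else if !st.2 then (st.1 ++ [c], st.2)
        else st)
      (out, b)).1 = out ++ pvF cs b := by
  induction cs generalizing out b with
  | nil => simp [pvF]
  | cons c r ih =>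
    simp only [List.foldl_cons]
    by_cases hc : c = '\''
    · subst hc
      rw [if_pos (by simp)]
      rw [ih]
      simp [pvF]
    · rw [if_neg (by simp [hc])]
      cases b with
      | false =>
        rw [if_pos (by simp)]
        rw [ih]
        simp [pvF, hc]
      | true =>
        rw [if_neg (by simp)]
        rw [ih]
        simp [pvF, hc]

-- enumerate-map is alternating keep/drop
theorem pv_enum_alt (parts : List (List Char)) (n : Nat) :
    ((PySem.List.enumerate parts ((2 * n : Nat) : Int)).map
        (fun p => if PySem.Int.mod p.1 2 == 0 then p.2 else []) = pvAltKeep parts)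
    ∧ ((PySem.List.enumerate parts ((2 * n + 1 : Nat) : Int)).map
        (fun p => if PySem.Int.mod p.1 2 == 0 then p.2 else []) = pvAltDrop parts) := by
  induction parts generalizing n with
  | nil => simp [PySem.List.enumerate_nil, pvAltKeep, pvAltDrop]
  | cons x xs ih =>
    constructor
    · rw [PySem.List.enumerate_cons, List.map_cons]
      have h1 : (PySem.Int.mod ((2 * n : Nat) : Int) 2 == 0) = true := by
        simp [PySem.Int.mod]
      have h2 : ((2 * n : Nat) : Int) + 1 = ((2 * n + 1 : Nat) : Int) := by push_cast; ring
      rw [h2]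
      simp only [h1, if_true, pvAltKeep, (ih n).2]
    · rw [PySem.List.enumerate_cons, List.map_cons]
      have h1 : (PySem.Int.mod ((2 * n + 1 : Nat) : Int) 2 == 0) = false := by
        simp [PySem.Int.mod]
      have h2 : ((2 * n + 1 : Nat) : Int) + 1 = ((2 * (n + 1) : Nat) : Int) := by push_cast; ring
      rw [h2]
      simp only [h1, Bool.false_eq_true, if_false, pvAltDrop, (ih (n + 1)).1]

-- pvF's equations, stated explicitly to keep rewriting controlled
theorem pvF_quote (r : List Char) (b : Bool) : pvF ('\'' :: r) b = '\'' :: pvF r (!b) := by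
  simp [pvF]
theorem pvF_other {c : Char} (hc : c ≠ '\'') (r : List Char) (b : Bool) :
    pvF (c :: r) b = if b then pvF r b else c :: pvF r b := by
  simp [pvF, hc]
theorem pvSplit1_quote (r : List Char) : pvSplit1 ('\'' :: r) = [] :: pvSplit1 r := by
  simp [pvSplit1]
theorem pvSplit1_other {c : Char} (hc : c ≠ '\'') {r p : List Char} {ps : List (List Char)}
    (h1 : pvSplit1 r = p :: ps) : pvSplit1 (c :: r) = (c :: p) :: ps := by
  simp [pvSplit1, hc, h1]

-- joining the alternately kept/blanked segments gives pvF
theorem pv_join_alt (cs : List Char) :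
    (PySem.Chars.join ['\''] (pvAltKeep (pvSplit1 cs)) = pvF cs false)
    ∧ (PySem.Chars.join ['\''] (pvAltDrop (pvSplit1 cs)) = pvF cs true) := by
  induction cs with
  | nil =>
    constructor <;>
      simp [pvSplit1, pvAltKeep, pvAltDrop, pvF, PySem.Chars.join, List.intercalate]
  | cons c r ih =>
    by_cases hc : c = '\''
    · subst hc
      obtain ⟨p, ps, h1⟩ : ∃ p ps, pvSplit1 r = p :: ps := by
        cases h : pvSplit1 r with
        | nil => exact absurd h (pvSplit1_ne_nil r)
        | cons p ps => exact ⟨p, ps, rfl⟩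
      constructor
      · rw [pvSplit1_quote, pvF_quote]
        show PySem.Chars.join ['\''] ([] :: pvAltDrop (pvSplit1 r)) = '\'' :: pvF r true
        rw [h1]
        show PySem.Chars.join ['\''] ([] :: [] :: pvAltKeep ps) = '\'' :: pvF r true
        rw [PySem.Chars.join_cons_cons]
        rw [show pvAltDrop (pvSplit1 r) = [] :: pvAltKeep ps from by rw [h1]; rfl] at ih
        simpa using ih.2
      · rw [pvSplit1_quote, pvF_quote]
        show PySem.Chars.join ['\''] ([] :: pvAltKeep (pvSplit1 r)) = '\'' :: pvF r false
        rw [h1]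
        show PySem.Chars.join ['\''] ([] :: p :: pvAltDrop ps) = '\'' :: pvF r false
        rw [PySem.Chars.join_cons_cons]
        rw [show pvAltKeep (pvSplit1 r) = p :: pvAltDrop ps from by rw [h1]; rfl] at ih
        simpa using ih.1
    · obtain ⟨p, ps, h1⟩ : ∃ p ps, pvSplit1 r = p :: ps := by
        cases h : pvSplit1 r with
        | nil => exact absurd h (pvSplit1_ne_nil r)
        | cons p ps => exact ⟨p, ps, rfl⟩
      rw [h1] at ih
      constructor
      · rw [pvSplit1_other hc h1, pvF_other hc, if_neg (by simp)]
        show PySem.Chars.join ['\''] ((c :: p) :: pvAltDrop ps) = c :: pvF r false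
        rw [← ih.1]
        show _ = c :: PySem.Chars.join ['\''] (p :: pvAltDrop ps)
        cases ps with
        | nil => simp [pvAltDrop, PySem.Chars.join, List.intercalate]
        | cons p2 ps2 =>
          show PySem.Chars.join ['\''] ((c :: p) :: [] :: pvAltKeep ps2)
            = c :: PySem.Chars.join ['\''] (p :: [] :: pvAltKeep ps2)
          rw [PySem.Chars.join_cons_cons, PySem.Chars.join_cons_cons]
          simp
      · rw [pvSplit1_other hc h1, pvF_other hc, if_pos rfl]
        show PySem.Chars.join ['\''] ([] :: pvAltKeep ps) = pvF r true
        rw [← ih.2]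
        rfl

-- ===== VERDICT (by name: the statement is the Claim_ definition above) =====
theorem remove_text_inside_gaensefuesschen_spec : Claim_equal_remove_text_inside_gaensefuesschen := by
  intro expression _
  unfold Spec_remove_text_inside_gaensefuesschen
  unfold remove_text_inside_gaensefuesschen remove_text_inside_gaensefuesschen_alt
  rw [pvSplitOn_eq]
  have he := (pv_enum_alt (pvSplit1 expression.toList) 0).1
  simp only [Nat.mul_zero, Nat.cast_zero] at he
  rw [he, (pv_join_alt expression.toList).1]
  rw [pvFoldA_spec expression.toList [] false]
  simp
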